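-- pv_equiv track=rewrite | github.com/harsh-mange/NeuroDesk | backend/simple_main.py | determine_energy_level
-- ===== SOURCE A (Python) =====
-- def determine_energy_level(text):
--     """Determine energy level based on keywords"""
--     text_lower = text.lower()
--
--     high_energy_words = ['urgent', 'important', 'deadline', 'meeting', 'presentation', 'project', 'report']
--     low_energy_words = ['maybe', 'sometime', 'eventually', 'later', 'when i have time', 'if possible', 'optional']
--
--     high_count = sum(1 for word in high_energy_words if word in text_lower)
--     low_count = sum(1 for word in low_energy_words if word in text_lower)
--
--     if high_count > low_count:
--         return "high"
--     elif low_count > high_count: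
--         return "low"
--     else:
--         return "medium"
-- ===== SOURCE B (Python) =====
-- # Text-driven matcher: one scan over the text; at each position a first-character
-- # dispatch table proposes only the keywords that can start there; matched keywords
-- # are collected in a set once, and the net weight of the found set decides the level.
--
-- _ENERGY_WEIGHTS = [
--     ("urgent", 1), ("important", 1), ("deadline", 1), ("meeting", 1),
--     ("presentation", 1), ("project", 1), ("report", 1),
--     ("maybe", -1), ("sometime", -1), ("eventually", -1), ("later", -1),
--     ("when i have time", -1), ("if possible", -1), ("optional", -1),
-- ]
--
-- _BY_FIRST = {}
-- for _word, _w in _ENERGY_WEIGHTS: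
--     _BY_FIRST[_word[0]] = _BY_FIRST.get(_word[0], []) + [(_word, _w)]
--
-- def determine_energy_level(text):
--     tl = text.lower()
--     found = set()
--     for i, ch in enumerate(tl):
--         for word, _w in _BY_FIRST.get(ch, []):
--             if word not in found and tl.startswith(word, i):
--                 found.add(word)
--     score = sum(w for word, w in _ENERGY_WEIGHTS if word in found)
--     return "high" if score > 0 else ("low" if score < 0 else "medium")
-- ===== Notes on version B (the rewrite author's own statement) =====
-- stated objective: alternative
-- what changed: A runs a substring search over the whole text for each keyword and compares two counts; B makes one text-driven scan in which a first-character dispatch table proposes candidate keywords at each position, collects matches once into a set, and decides the level by the net weight of the found set.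
import Mathlib
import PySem

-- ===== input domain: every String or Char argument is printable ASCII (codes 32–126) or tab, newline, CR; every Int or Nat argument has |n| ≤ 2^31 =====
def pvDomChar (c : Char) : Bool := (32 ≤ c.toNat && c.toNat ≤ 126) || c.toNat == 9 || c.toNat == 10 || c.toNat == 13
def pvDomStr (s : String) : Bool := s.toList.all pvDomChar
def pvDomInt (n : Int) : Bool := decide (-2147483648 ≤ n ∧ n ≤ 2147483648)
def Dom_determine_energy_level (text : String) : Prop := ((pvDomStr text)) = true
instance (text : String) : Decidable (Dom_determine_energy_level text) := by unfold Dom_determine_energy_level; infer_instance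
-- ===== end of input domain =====

-- B replaces A's per-keyword substring searches by one text-driven scan with a
-- first-character dispatch table and a found-set whose net weight decides the level.

-- ===== PORT A =====
def highEnergyWords : List String :=
  ["urgent", "important", "deadline", "meeting", "presentation", "project", "report"]
def lowEnergyWords : List String :=
  ["maybe", "sometime", "eventually", "later", "when i have time", "if possible", "optional"]

def determine_energy_level (text : String) : String :=
  let text_lower := PySem.Str.lower text
  let high_count : Int :=
    highEnergyWords.foldl (fun acc w => if PySem.Str.isIn w text_lower then acc + 1 else acc) 0
  let low_count : Int :=
    lowEnergyWords.foldl (fun acc w => if PySem.Str.isIn w text_lower then acc + 1 else acc) 0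
  if high_count > low_count then "high"
  else if low_count > high_count then "low"
  else "medium"

-- ===== PORT B =====
def energyWeights : List (String × Int) :=
  [("urgent", 1), ("important", 1), ("deadline", 1), ("meeting", 1),
   ("presentation", 1), ("project", 1), ("report", 1),
   ("maybe", -1), ("sometime", -1), ("eventually", -1), ("later", -1),
   ("when i have time", -1), ("if possible", -1), ("optional", -1)]

-- _BY_FIRST: Python keys are the 1-character strings word[0]; modelled as Char (exact:
-- every keyword is nonempty and the keys are only compared with single characters of the text).
def byFirst : PySem.Dict Char (List (String × Int)) :=
  energyWeights.foldl
    (fun d wp => PySem.Dict.insert d (wp.1.toList.headD ' ')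
                   (PySem.Dict.getD d (wp.1.toList.headD ' ') [] ++ [wp]))
    PySem.Dict.empty

-- tl.startswith(word, i) with 0 ≤ i ≤ len(tl) is exactly: word.toList is a prefix of tl.toList.drop i.
def determine_energy_level_alt (text : String) : String :=
  let tlc := (PySem.Str.lower text).toList
  let found : PySem.Set String :=
    (PySem.List.enumerate tlc).foldl
      (fun f ic =>
        (PySem.Dict.getD byFirst ic.2 []).foldl
          (fun f wp =>
            if !(PySem.Set.contains f wp.1)
                && PySem.Chars.startswith (tlc.drop ic.1.toNat) wp.1.toList
            then PySem.Set.add f wp.1 else f)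
          f)
      PySem.Set.empty
  let score : Int :=
    energyWeights.foldl
      (fun acc wp => if PySem.Set.contains found wp.1 then acc + wp.2 else acc) 0
  if score > 0 then "high" else if score < 0 then "low" else "medium"

-- ===== PRECONDITION & SPEC =====
def Spec_determine_energy_level (text : String) (out : String) : Prop := out = determine_energy_level_alt text
instance (text : String) (out : String) : Decidable (Spec_determine_energy_level text out) := by unfold Spec_determine_energy_level; infer_instance

-- ===== CLAIM (what is proved, stated in full; the proofs are below) =====
def Claim_equal_determine_energy_level : Prop := ∀ (text : String), Dom_determine_energy_level text → Spec_determine_energy_level text (determine_energy_level text)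


-- ===== LEMMAS AND PROOFS =====

-- membership in the found-set after the inner (dispatch-list) fold
theorem inner_mem (l : List (String × Int)) (suf : List Char) (f : PySem.Set String) (w : String) :
    (w ∈ l.foldl (fun f wp =>
        if !(PySem.Set.contains f wp.1) && PySem.Chars.startswith suf wp.1.toList
        then PySem.Set.add f wp.1 else f) f)
    ↔ (w ∈ f ∨ ∃ wp ∈ l, wp.1 = w ∧ PySem.Chars.startswith suf wp.1.toList = true) := by
  induction l generalizing f with
  | nil => simp
  | cons x xs ih =>
    simp only [List.foldl_cons, ih, List.exists_mem_cons_iff]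
    split_ifs with h <;>
      simp only [Bool.and_eq_true, Bool.not_eq_true', PySem.Set.contains_eq_listContains,
        PySem.Set.mem_add] at h ⊢ <;>
      constructor
    · rintro ((h1 | rfl) | h2)
      exacts [Or.inl h1, Or.inr (Or.inl ⟨rfl, h.2⟩), Or.inr (Or.inr h2)]
    · rintro (h1 | ⟨hw, _⟩ | h2)
      exacts [Or.inl (Or.inl h1), Or.inl (Or.inr hw.symm), Or.inr h2]
    · rintro (h1 | h2)
      exacts [Or.inl h1, Or.inr (Or.inr h2)]
    · rintro (h1 | ⟨hw, hs⟩ | h2)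
      · exact Or.inl h1
      · rcases hm : List.contains f x.1 with _ | _
        · exact absurd ⟨by simpa [List.contains_iff_mem] using hm, hs⟩ h
        · exact Or.inl (hw ▸ (List.contains_iff_mem.mp hm))
      · exact Or.inr h2

theorem byFirst_eq : byFirst = { items :=
    [('u', [("urgent", 1)]), ('i', [("important", 1), ("if possible", -1)]),
     ('d', [("deadline", 1)]), ('m', [("meeting", 1), ("maybe", -1)]),
     ('p', [("presentation", 1), ("project", 1)]), ('r', [("report", 1)]),
     ('s', [("sometime", -1)]), ('e', [("eventually", -1)]), ('l', [("later", -1)]),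
     ('w', [("when i have time", -1)]), ('o', [("optional", -1)])] } := by rfl

theorem head_eq_of_startswith (c : Char) (rest p : List Char)
    (h : PySem.Chars.startswith (c :: rest) p = true) (hp : p ≠ []) : p.headD ' ' = c := by
  rw [PySem.Chars.startswith_iff] at h
  cases p with
  | nil => exact absurd rfl hp
  | cons a l =>
    obtain ⟨t, ht⟩ := h
    simp only [List.cons_append, List.cons.injEq] at ht
    simpa using ht.1

theorem mem_getD_imp {κ β : Type} [BEq κ] (d : PySem.Dict κ (List β)) (c : κ) (x : β)
    (h : x ∈ PySem.Dict.getD d c []) : ∃ e ∈ d.items, x ∈ e.2 := by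
  unfold PySem.Dict.getD PySem.Dict.get? at h
  cases hf : List.find? (fun p => p.1 == c) d.items with
  | none => rw [hf] at h; simp at h
  | some e =>
    rw [hf] at h
    simp only [Option.map_some, Option.getD_some] at h
    exact ⟨e, List.mem_of_find?_eq_some hf, h⟩

theorem byFirst_items_subset :
    ∀ e ∈ byFirst.items, ∀ wp ∈ e.2, wp ∈ energyWeights := by
  rw [byFirst_eq]; decide

theorem dispatch_iff (c : Char) (rest : List Char) (w : String) :
    (∃ wp ∈ PySem.Dict.getD byFirst c [], wp.1 = w ∧ PySem.Chars.startswith (c :: rest) wp.1.toList = true)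
    ↔ (∃ wp ∈ energyWeights, wp.1 = w ∧ PySem.Chars.startswith (c :: rest) wp.1.toList = true) := by
  constructor
  · rintro ⟨wp, hwp, rfl, hs⟩
    obtain ⟨e, he, hw⟩ := mem_getD_imp _ _ _ hwp
    exact ⟨wp, byFirst_items_subset e he wp hw, rfl, hs⟩
  · rintro ⟨wp, hwp, rfl, hs⟩
    refine ⟨wp, ?_, rfl, hs⟩
    simp only [energyWeights, List.mem_cons, List.not_mem_nil, or_false] at hwp
    rcases hwp with rfl|rfl|rfl|rfl|rfl|rfl|rfl|rfl|rfl|rfl|rfl|rfl|rfl|rfl <;>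
      (have hc := head_eq_of_startswith _ _ _ hs (by decide); subst hc; rw [byFirst_eq]; decide)

-- membership in the found-set after the whole scan
theorem scan_mem (tlc : List Char) (ps : List (Int × Char)) (f : PySem.Set String) (w : String)
    (hps : ∀ p ∈ ps, List.drop p.1.toNat tlc = p.2 :: List.drop (p.1.toNat + 1) tlc) :
    (w ∈ ps.foldl (fun f ic =>
        (PySem.Dict.getD byFirst ic.2 []).foldl
          (fun f wp =>
            if !(PySem.Set.contains f wp.1)
                && PySem.Chars.startswith (tlc.drop ic.1.toNat) wp.1.toList
            then PySem.Set.add f wp.1 else f) f) f)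
    ↔ (w ∈ f ∨ ∃ p ∈ ps, ∃ wp ∈ energyWeights, wp.1 = w ∧
          PySem.Chars.startswith (tlc.drop p.1.toNat) wp.1.toList = true) := by
  induction ps generalizing f with
  | nil => simp
  | cons p ps ih =>
    simp only [List.foldl_cons]
    rw [ih _ (fun q hq => hps q (List.mem_cons_of_mem _ hq)), inner_mem]
    have hd := hps p (List.mem_cons_self ..)
    rw [hd, dispatch_iff]
    rw [← hd]
    simp only [List.mem_cons]
    constructor
    · rintro ((h | h) | h)
      · exact Or.inl h
      · exact Or.inr ⟨p, Or.inl rfl, h⟩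
      · obtain ⟨q, hq, h⟩ := h; exact Or.inr ⟨q, Or.inr hq, h⟩
    · rintro (h | ⟨q, (rfl | hq), h⟩)
      · exact Or.inl (Or.inl h)
      · exact Or.inl (Or.inr h)
      · exact Or.inr ⟨q, hq, h⟩

-- every keyword is nonempty
theorem keywords_ne_nil (wp : String × Int) (h : wp ∈ energyWeights) : wp.1.toList ≠ [] := by
  fin_cases h <;> decide

-- found-set membership = Python's substring test, for every keyword
theorem found_contains (tlc : List Char) (wp : String × Int) (h : wp ∈ energyWeights) :
    PySem.Set.contains
      ((PySem.List.enumerate tlc).foldl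
        (fun f ic =>
          (PySem.Dict.getD byFirst ic.2 []).foldl
            (fun f wp =>
              if !(PySem.Set.contains f wp.1)
                  && PySem.Chars.startswith (tlc.drop ic.1.toNat) wp.1.toList
              then PySem.Set.add f wp.1 else f) f)
        PySem.Set.empty) wp.1
    = PySem.Chars.isIn wp.1.toList tlc := by
  have hps : ∀ p ∈ PySem.List.enumerate tlc 0,
      List.drop p.1.toNat tlc = p.2 :: List.drop (p.1.toNat + 1) tlc := by
    intro p hp
    rw [PySem.List.mem_enumerate_iff] at hp
    obtain ⟨k, hk, rfl⟩ := hp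
    simp only [zero_add, Int.toNat_natCast]
    exact List.drop_eq_getElem_cons hk
  rcases hb : PySem.Chars.isIn wp.1.toList tlc with _ | _
  · -- not in: found-set does not contain it
    rw [← Bool.not_eq_true]
    rw [PySem.Set.contains_iff, scan_mem tlc _ _ _ hps]
    rintro (h0 | ⟨p, hp, q, hq, hqw, hmatch⟩)
    · simp [PySem.Set.empty] at h0
    · rw [PySem.Chars.startswith_iff] at hmatch
      rw [hqw] at hmatch
      have : PySem.Chars.isIn wp.1.toList tlc = true :=
        (PySem.Chars.exists_prefix_drop_iff_isIn _ _).mp ⟨_, hmatch⟩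
      rw [hb] at this; exact absurd this (by simp)
  · rw [PySem.Set.contains_iff, scan_mem tlc _ _ _ hps]
    right
    obtain ⟨j, hj⟩ := (PySem.Chars.exists_prefix_drop_iff_isIn wp.1.toList tlc).mpr hb
    have hjlt : j < tlc.length := by
      by_contra hge
      rw [List.drop_eq_nil_of_le (by omega)] at hj
      exact keywords_ne_nil wp h (List.prefix_nil.mp hj)
    refine ⟨((j : Int), tlc[j]), ?_, wp, h, rfl, ?_⟩
    · rw [PySem.List.mem_enumerate_iff]; exact ⟨j, hjlt, by simp⟩
    · rw [PySem.Chars.startswith_iff]; simpa using hj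

-- counting folds as sums (shared by both ports)
theorem foldl_count_eq (l : List String) (p : String → Bool) (init : Int) :
    l.foldl (fun acc w => if p w then acc + 1 else acc) init
      = init + (l.map (fun w => if p w then (1 : Int) else 0)).sum := by
  induction l generalizing init with
  | nil => simp
  | cons x xs ih =>
    simp only [List.foldl_cons, List.map_cons, List.sum_cons, ih]
    by_cases h : p x = true <;> simp [h] <;> ring

theorem foldl_weight_eq (l : List (String × Int)) (p : String → Bool) (init : Int) :
    l.foldl (fun acc wp => if p wp.1 then acc + wp.2 else acc) init
      = init + (l.map (fun wp => if p wp.1 then wp.2 else 0)).sum := by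
  induction l generalizing init with
  | nil => simp
  | cons x xs ih =>
    simp only [List.foldl_cons, List.map_cons, List.sum_cons, ih]
    by_cases h : p x.1 = true <;> simp [h] <;> ring

theorem energyWeights_eq :
    energyWeights = highEnergyWords.map (fun w => (w, (1 : Int)))
      ++ lowEnergyWords.map (fun w => (w, (-1 : Int))) := rfl

theorem score_eq (p : String → Bool) :
    energyWeights.foldl (fun acc wp => if p wp.1 then acc + wp.2 else acc) 0
      = highEnergyWords.foldl (fun acc w => if p w then acc + 1 else acc) 0
        - lowEnergyWords.foldl (fun acc w => if p w then acc + 1 else acc) 0 := by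
  rw [foldl_weight_eq, foldl_count_eq, foldl_count_eq, energyWeights_eq]
  simp only [List.map_append, List.sum_append, List.map_map, Function.comp_def]
  have : forall l : List String,
      (l.map (fun w => if p w then (-1 : Int) else 0)).sum
        = -(l.map (fun w => if p w then (1 : Int) else 0)).sum := by
    intro l; induction l with
    | nil => simp
    | cons x xs ih => by_cases h : p x = true <;> simp [h, ih] <;> ring
  rw [this]; ring

-- ===== VERDICT (by name: the statement is the Claim_ definition above) =====
theorem determine_energy_level_spec : Claim_equal_determine_energy_level := by
  intro text _
  simp only [Spec_determine_energy_level, determine_energy_level, determine_energy_level_alt]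
  rw [PySem.List.foldl_congr_mem energyWeights _
      (fun acc wp => if PySem.Str.isIn wp.1 (PySem.Str.lower text) then acc + wp.2 else acc) 0
      (fun acc wp hwp => by rw [found_contains _ wp hwp, ← PySem.Str.isIn_eq])]
  rw [score_eq (fun w => PySem.Str.isIn w (PySem.Str.lower text))]
  set hc := highEnergyWords.foldl
    (fun acc w => if PySem.Str.isIn w (PySem.Str.lower text) then acc + 1 else acc) (0 : Int)
  set lc := lowEnergyWords.foldl
    (fun acc w => if PySem.Str.isIn w (PySem.Str.lower text) then acc + 1 else acc) (0 : Int)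
  split_ifs <;> first | rfl | omega
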